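-- pv_equiv track=rewrite | github.com/dkalashnikov/level-up-advanced-python-3213390 | challenge/pairwise_offset.py | pairwise_offset
-- ===== SOURCE A (Python) =====
-- def pairwise_offset(sequence, fillvalue='*', offset=0):
--     for i in range(0, len(sequence)+offset):
--         try:
--             first = sequence[i]
--         except IndexError:
--             first = fillvalue
--
--         sec_index = i-offset
--         try:
--             sec = sequence[sec_index]
--             if sec_index < 0:
--                 sec = fillvalue
--         except IndexError:
--             sec = fillvalue
--         yield (first, sec)
-- ===== SOURCE B (Python) =====
-- def pairwise_offset(sequence, fillvalue='*', offset=0):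
--     seq = list(sequence)
--     total = max(len(seq) + offset, 0)
--     pad = max(offset, 0)
--     firsts = (seq + [fillvalue] * pad)[:total]
--     secs = ([fillvalue] * pad + seq)[max(-offset, 0):][:total]
--     yield from zip(firsts, secs)
-- ===== Notes on version B (the rewrite author's own statement) =====
-- stated objective: simpler
-- what changed: Replaces the per-index try/except and negative-index bookkeeping with one-shot construction of two padded/shifted lists and a single zip over them.
import Mathlib
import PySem

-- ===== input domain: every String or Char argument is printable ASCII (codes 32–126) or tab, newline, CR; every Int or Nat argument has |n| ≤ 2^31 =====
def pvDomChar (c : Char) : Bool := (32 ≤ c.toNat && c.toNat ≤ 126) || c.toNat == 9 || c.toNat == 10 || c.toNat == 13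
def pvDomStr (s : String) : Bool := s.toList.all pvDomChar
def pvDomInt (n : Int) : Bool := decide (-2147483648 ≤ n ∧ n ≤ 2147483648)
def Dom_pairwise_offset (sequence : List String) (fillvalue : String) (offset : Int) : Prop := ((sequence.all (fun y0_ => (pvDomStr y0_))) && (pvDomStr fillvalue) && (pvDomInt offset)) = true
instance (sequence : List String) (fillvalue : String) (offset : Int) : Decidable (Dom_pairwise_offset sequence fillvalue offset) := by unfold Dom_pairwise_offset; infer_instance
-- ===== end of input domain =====

-- B replaces A's per-index try/except loop with one-shot construction of two padded/shifted lists zipped once (objective: simpler).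


-- ===== PORT A =====
-- for i in range(0, len(sequence)+offset): try-index with fillvalue on IndexError, plus the explicit negative-sec_index fill
def pairwise_offset (sequence : List String) (fillvalue : String) (offset : Int) : List (String × String) :=
  (PySem.List.pyRange 0 ((sequence.length : Int) + offset) 1).map (fun i =>
    let first := match PySem.List.pyGet? sequence i with
      | some v => v
      | none => fillvalue
    let sec_index := i - offset
    let sec := match PySem.List.pyGet? sequence sec_index with
      | some v => if sec_index < 0 then fillvalue else v
      | none => fillvalue
    (first, sec))

-- ===== PORT B =====
def pairwise_offset_alt (sequence : List String) (fillvalue : String) (offset : Int) : List (String × String) :=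
  let seq := sequence
  let total := max ((seq.length : Int) + offset) 0
  let pad := (max offset 0).toNat
  let firsts := PySem.List.slice (seq ++ List.replicate pad fillvalue) none (some total)
  let secs := PySem.List.slice (PySem.List.slice (List.replicate pad fillvalue ++ seq) (some (max (-offset) 0)) none) none (some total)
  firsts.zip secs

-- ===== PRECONDITION & SPEC =====
def Spec_pairwise_offset (sequence : List String) (fillvalue : String) (offset : Int) (out : List (String × String)) : Prop := out = pairwise_offset_alt sequence fillvalue offset
instance (sequence : List String) (fillvalue : String) (offset : Int) (out : List (String × String)) : Decidable (Spec_pairwise_offset sequence fillvalue offset out) := by unfold Spec_pairwise_offset; infer_instance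

-- ===== CLAIM (what is proved, stated in full; the proofs are below) =====
def Claim_equal_pairwise_offset : Prop := ∀ (sequence : List String) (fillvalue : String) (offset : Int), Dom_pairwise_offset sequence fillvalue offset → Spec_pairwise_offset sequence fillvalue offset (pairwise_offset sequence fillvalue offset)

-- ===== LEMMAS AND PROOFS =====

theorem pairwise_offset_eq (sequence : List String) (fillvalue : String) (offset : Int) :
    pairwise_offset sequence fillvalue offset = pairwise_offset_alt sequence fillvalue offset := by
  have h1 : (0:Int) ≤ max (-offset) 0 := le_max_right _ _
  have h2 : (0:Int) ≤ max ((sequence.length:Int) + offset) 0 := le_max_right _ _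
  simp only [pairwise_offset, pairwise_offset_alt, PySem.List.pyRange_one,
    PySem.List.slice_from _ h1, PySem.List.slice_to _ h2, List.map_map]
  apply List.ext_getElem
  · simp
    omega
  · intro i hl1 hl2
    simp only [List.getElem_map, List.getElem_range, List.getElem_zip, List.getElem_take,
      List.getElem_drop, Function.comp_apply, zero_add]
    simp only [List.length_map, List.length_range] at hl1
    refine Prod.ext ?_ ?_
    · -- first component
      by_cases hin : i < sequence.length
      · rw [PySem.List.pyGet?_natCast, List.getElem?_eq_getElem hin]
        simp [hin]
      · rw [PySem.List.pyGet?_natCast, List.getElem?_eq_none (by omega)]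
        simp only [List.getElem_append]
        split
        · omega
        · simp
    · -- second component
      by_cases hs : (i : Int) - offset < 0
      · have hb : PySem.List.pyGet? sequence ((i : Int) - offset) = none ∨
            ∃ v, PySem.List.pyGet? sequence ((i : Int) - offset) = some v := by
          cases PySem.List.pyGet? sequence ((i : Int) - offset) with
          | none => exact Or.inl rfl
          | some v => exact Or.inr ⟨v, rfl⟩
        have hA : (match PySem.List.pyGet? sequence ((i : Int) - offset) with
            | some v => if (i : Int) - offset < 0 then fillvalue else v
            | none => fillvalue) = fillvalue := by
          rcases hb with h | ⟨v, h⟩ <;> simp [h, hs]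
        rw [hA]
        simp only [List.getElem_append, List.length_replicate]
        split
        · simp
        · omega
      · rw [not_lt] at hs
        have hlt : ((i : Int) - offset).toNat < sequence.length := by omega
        rw [PySem.List.pyGet?_of_nonneg _ hs, List.getElem?_eq_getElem hlt]
        simp only [if_neg (not_lt.mpr hs)]
        simp only [List.getElem_append, List.length_replicate]
        split
        · next h => exfalso; omega
        · next h =>
          congr 1
          omega

-- ===== VERDICT (by name: the statement is the Claim_ definition above) =====
theorem pairwise_offset_spec : Claim_equal_pairwise_offset := by
  intro sequence fillvalue offset _
  exact pairwise_offset_eq sequence fillvalue offset
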